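-- pv_equiv track=rewrite | github.com/sejyom/coding-test | 프로그래머스/lv1/82612. 부족한 금액 계산하기/부족한 금액 계산하기.py | solution
-- ===== SOURCE A (Python) =====
-- def solution(price, money, count):
--     answer = 0
--     for i in range(1, count+1):
--         answer+=(price*i)
--
--     answer -= money
--     if answer > 0:
--         return answer
--     else:
--         return 0
--     return answer
-- ===== SOURCE B (Python) =====
-- def solution(price, money, count):
--     n = count if count > 0 else 0
--     shortfall = price * n * (n + 1) // 2 - money
--     return shortfall if shortfall > 0 else 0
-- ===== Notes on version B (the rewrite author's own statement) =====
-- stated objective: faster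
-- what changed: Replaces the O(count) accumulation loop over range(1,count+1) with the closed-form Gauss sum price*count*(count+1)//2, then clamps at 0.
import Mathlib
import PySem

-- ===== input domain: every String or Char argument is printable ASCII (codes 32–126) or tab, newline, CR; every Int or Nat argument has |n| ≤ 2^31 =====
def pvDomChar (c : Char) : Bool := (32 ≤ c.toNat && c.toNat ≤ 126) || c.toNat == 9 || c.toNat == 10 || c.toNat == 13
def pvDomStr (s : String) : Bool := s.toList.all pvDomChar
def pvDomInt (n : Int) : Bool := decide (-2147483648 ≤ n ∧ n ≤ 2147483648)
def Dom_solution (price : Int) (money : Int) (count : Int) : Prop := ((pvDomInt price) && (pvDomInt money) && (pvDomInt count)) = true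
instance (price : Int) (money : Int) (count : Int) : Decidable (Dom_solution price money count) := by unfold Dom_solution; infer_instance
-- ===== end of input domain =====

-- B replaces A's O(count) accumulation loop with the closed-form Gauss sum (objective: faster, asymptotic).


-- ===== PORT A =====
def solution (price : Int) (money : Int) (count : Int) : Int :=
  let answer : Int := (PySem.List.pyRange 1 (count + 1) 1).foldl (fun answer i => answer + price * i) 0
  let answer := answer - money
  if answer > 0 then answer else 0

-- ===== PORT B =====
def solution_alt (price : Int) (money : Int) (count : Int) : Int :=
  let n : Int := if count > 0 then count else 0
  let shortfall : Int := PySem.Int.floordiv (price * n * (n + 1)) 2 - money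
  if shortfall > 0 then shortfall else 0

-- ===== PRECONDITION & SPEC =====
def Spec_solution (price : Int) (money : Int) (count : Int) (out : Int) : Prop := out = solution_alt price money count
instance (price : Int) (money : Int) (count : Int) (out : Int) : Decidable (Spec_solution price money count out) := by unfold Spec_solution; infer_instance

-- ===== CLAIM (what is proved, stated in full; the proofs are below) =====
def Claim_equal_solution : Prop := ∀ (price : Int) (money : Int) (count : Int), Dom_solution price money count → Spec_solution price money count (solution price money count)

-- ===== LEMMAS AND PROOFS =====

-- twice the loop's accumulated sum is price * n * (n+1)
theorem pv_two_foldl (price : Int) (n : Nat) :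
    2 * (((List.range n).map (fun k : Nat => (1 : Int) + (k : Int))).foldl (fun a i => a + price * i) 0)
      = price * n * (n + 1) := by
  induction n with
  | zero => simp
  | succ m ih =>
    rw [List.range_succ, List.map_append, List.foldl_append]
    have hshift : ∀ (c : Int) (l : List Int),
        l.foldl (fun a i => a + price * i) c = c + l.foldl (fun a i => a + price * i) 0 := by
      intro c l
      induction l generalizing c with
      | nil => simp
      | cons x xs ihx => simp [List.foldl]; rw [ihx (c + price * x), ihx (price * x)]; ring
    simp only [List.map, List.foldl]
    rw [hshift]
    push_cast
    ring_nf
    ring_nf at ih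
    omega

theorem pv_foldl_closed (price : Int) (n : Nat) :
    ((List.range n).map (fun k : Nat => (1 : Int) + (k : Int))).foldl (fun a i => a + price * i) 0
      = PySem.Int.floordiv (price * n * (n + 1)) 2 := by
  rw [← pv_two_foldl price n]
  set S := ((List.range n).map (fun k : Nat => (1 : Int) + (k : Int))).foldl (fun a i => a + price * i) 0 with hS
  symm
  rw [PySem.Int.floordiv_eq_iff_of_pos (by omega : (0:Int) < 2)]
  omega

-- ===== VERDICT (by name: the statement is the Claim_ definition above) =====
theorem solution_spec : Claim_equal_solution := by
  intro price money count _
  unfold Spec_solution solution solution_alt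
  rw [PySem.List.pyRange_one]
  by_cases h : count > 0
  · have hn : ((count + 1 - 1).toNat : Int) = count := by omega
    simp only [if_pos h]
    rw [pv_foldl_closed price, hn]
  · have hz : (count + 1 - 1).toNat = 0 := by omega
    simp only [if_neg h, hz]
    simp [PySem.Int.floordiv]
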